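-- pv_equiv track=rewrite | github.com/ShaanReal/Python-Projects | A6/SoundTools.py | make_smoothed_samples
-- ===== SOURCE A (Python) =====
-- def make_smoothed_samples(samples):
--     if len(samples) < 2:
--         return samples[:]  # not enough to smooth
--     new_samples = []
--
--     # first value: average of first two
--     new_samples.append(int((samples[0] + samples[1]) / 2))
--
--     # middle values: average of previous, current, next
--     for i in range(1, len(samples) - 1):
--         avg = int((samples[i - 1] + samples[i] + samples[i + 1]) / 3)
--         new_samples.append(avg)
--
--     # last value: average of last two
--     new_samples.append(int((samples[-2] + samples[-1]) / 2))
--     return new_samples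
-- ===== SOURCE B (Python) =====
-- def make_smoothed_samples(samples):
--     if len(samples) < 2:
--         return samples[:]  # not enough to smooth
--     n = len(samples)
--     # pass 1: cumulative (prefix) sums
--     prefix = [0]
--     for x in samples:
--         prefix.append(prefix[-1] + x)
--     # pass 2: each window sum is a difference of two prefix sums
--     out = []
--     for i in range(n):
--         lo = max(0, i - 1)
--         hi = min(n, i + 2)
--         out.append(int((prefix[hi] - prefix[lo]) / (hi - lo)))
--     return out
-- ===== Notes on version B (the rewrite author's own statement) =====
-- stated objective: alternative
-- what changed: Replaces A's direct neighbor additions in a three-branch structure (special first, middle loop, special last) with a two-stage prefix-sum algorithm: one pass builds cumulative sums, then each clamped window's sum is obtained as a difference prefix[hi]-prefix[lo] instead of re-adding neighbors.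
import Mathlib
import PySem

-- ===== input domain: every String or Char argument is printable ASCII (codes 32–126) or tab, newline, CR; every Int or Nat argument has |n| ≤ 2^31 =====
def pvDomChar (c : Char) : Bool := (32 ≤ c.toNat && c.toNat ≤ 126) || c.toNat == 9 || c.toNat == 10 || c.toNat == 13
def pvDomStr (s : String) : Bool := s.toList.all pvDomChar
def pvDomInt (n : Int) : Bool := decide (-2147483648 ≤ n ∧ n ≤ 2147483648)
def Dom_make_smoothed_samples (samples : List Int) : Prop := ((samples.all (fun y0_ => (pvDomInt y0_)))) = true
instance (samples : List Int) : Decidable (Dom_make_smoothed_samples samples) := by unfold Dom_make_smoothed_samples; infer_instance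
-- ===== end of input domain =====

-- B replaces A's direct three-branch neighbor additions with a two-stage prefix-sum algorithm
-- (build cumulative sums, then each clamped window's sum is a difference of two prefix sums);
-- objective: alternative.

-- ===== PORT A =====
-- int((x + y) / 2) / int((…)/3): on Dom the sums fit well below 2^53, so Python's float
-- division is exact enough that int() truncation equals Int.tdiv (truncation toward zero);
-- indices are always in range past the length-≥-2 guard, so pyGetD with default 0 is exact.
def make_smoothed_samples (samples : List Int) : List Int :=
  if samples.length < 2 then samples
  else
    let new1 : List Int := [] ++ [(PySem.List.pyGetD samples 0 0 + PySem.List.pyGetD samples 1 0).tdiv 2]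
    let new2 := (PySem.List.pyRange 1 ((samples.length : Int) - 1) 1).foldl
      (fun acc i =>
        acc ++ [(PySem.List.pyGetD samples (i - 1) 0 + PySem.List.pyGetD samples i 0
                  + PySem.List.pyGetD samples (i + 1) 0).tdiv 3]) new1
    new2 ++ [(PySem.List.pyGetD samples (-2) 0 + PySem.List.pyGetD samples (-1) 0).tdiv 2]

-- ===== PORT B =====
-- int((prefix[hi]-prefix[lo])/(hi-lo)) is Int.tdiv for the same reason as in port A
-- (the divisor hi-lo is 2 or 3, the numerator a window sum of at most three Dom ints).
def make_smoothed_samples_alt (samples : List Int) : List Int :=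
  if samples.length < 2 then samples
  else
    let n : Int := (samples.length : Int)
    let pre := samples.foldl (fun acc x => acc ++ [PySem.List.pyGetD acc (-1) 0 + x]) [(0 : Int)]
    (PySem.List.pyRange 0 n 1).map (fun i =>
      let lo := max 0 (i - 1)
      let hi := min n (i + 2)
      (PySem.List.pyGetD pre hi 0 - PySem.List.pyGetD pre lo 0).tdiv (hi - lo))

-- ===== PRECONDITION & SPEC =====
def Spec_make_smoothed_samples (samples : List Int) (out : List Int) : Prop := out = make_smoothed_samples_alt samples
instance (samples : List Int) (out : List Int) : Decidable (Spec_make_smoothed_samples samples out) := by unfold Spec_make_smoothed_samples; infer_instance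

-- ===== CLAIM (what is proved, stated in full; the proofs are below) =====
def Claim_equal_make_smoothed_samples : Prop := ∀ (samples : List Int), Dom_make_smoothed_samples samples → Spec_make_smoothed_samples samples (make_smoothed_samples samples)

-- ===== LEMMAS AND PROOFS =====

-- B's first pass builds exactly the scanl of running sums
theorem pv_fold_scanl (xs : List Int) : ∀ (ys : List Int) (t : Int),
    List.foldl (fun acc x => acc ++ [PySem.List.pyGetD acc (-1) 0 + x]) (ys ++ [t]) xs
      = ys ++ List.scanl (fun a b => a + b) t xs := by
  induction xs with
  | nil => intro ys t; simp
  | cons x xs ih =>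
    intro ys t
    simp only [List.foldl_cons, PySem.List.pyGetD_neg_one_append_singleton, List.scanl_cons]
    rw [show (ys ++ [t]) ++ [t + x] = (ys ++ [t]) ++ [t + x] from rfl, ih (ys ++ [t]) (t + x)]
    simp

-- the k-th running sum is the sum of the first k elements
theorem pv_scanl_getElem (xs : List Int) : ∀ (s : Int) (k : Nat)
    (h : k < (List.scanl (fun a b => a + b) s xs).length),
    (List.scanl (fun a b => a + b) s xs)[k] = s + (xs.take k).sum := by
  induction xs with
  | nil =>
    intro s k h
    simp at h
    subst h
    simp
  | cons x xs ih =>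
    intro s k h
    cases k with
    | zero => simp
    | succ k =>
      simp only [List.scanl_cons] at h ⊢
      simp only [List.getElem_cons_succ]
      rw [ih (s + x) k (by simpa using h)]
      simp [List.take_succ_cons]
      ring

-- reading the prefix list at a nonnegative in-range index
theorem pv_P (samples : List Int) (j : Int) (h0 : 0 ≤ j) (h1 : j ≤ (samples.length : Int)) :
    PySem.List.pyGetD (List.scanl (fun a b => a + b) 0 samples) j 0
      = (samples.take j.toNat).sum := by
  rw [@PySem.List.pyGetD_eq_getElem _ (List.scanl (fun a b => a + b) 0 samples) j 0 h0
      (by simp [List.length_scanl]; omega)]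
  rw [pv_scanl_getElem samples 0 j.toNat (by simp [List.length_scanl]; omega)]
  simp

-- a window sum is a difference of two prefix sums
theorem pv_window (xs : List Int) (lo hi : Nat) (h : lo ≤ hi) :
    (xs.take hi).sum - (xs.take lo).sum = ((xs.drop lo).take (hi - lo)).sum := by
  conv_lhs => rw [show hi = lo + (hi - lo) from by omega]
  rw [List.take_add, List.sum_append]
  ring_nf

-- take 3 of a drop, all three indices in range
theorem pv_take3 (xs : List Int) (k : Nat) (h : k + 3 ≤ xs.length) :
    (xs.drop k).take 3 = [xs[k], xs[k+1], xs[k+2]] := by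
  rw [List.drop_eq_getElem_cons (by omega : k < xs.length),
      List.drop_eq_getElem_cons (by omega : k+1 < xs.length),
      List.drop_eq_getElem_cons (by omega : k+1+1 < xs.length)]
  simp only [List.take_succ_cons, List.take_zero]
  simp only [show k+1+1 = k+2 from by omega]
  rfl

-- take 2 of a drop, both indices in range
theorem pv_take2 (xs : List Int) (k : Nat) (h : k + 2 ≤ xs.length) :
    (xs.drop k).take 2 = [xs[k], xs[k+1]] := by
  rw [List.drop_eq_getElem_cons (by omega : k < xs.length),
      List.drop_eq_getElem_cons (by omega : k+1 < xs.length)]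
  simp only [List.take_succ_cons, List.take_zero]
  rfl

theorem pv_equiv (samples : List Int) :
    make_smoothed_samples samples = make_smoothed_samples_alt samples := by
  unfold make_smoothed_samples make_smoothed_samples_alt
  by_cases h2 : samples.length < 2
  · simp [h2]
  · simp only [h2, if_false]
    have hn : 2 ≤ samples.length := by omega
    -- rewrite B's prefix fold to a scanl
    have hpre : samples.foldl (fun acc x => acc ++ [PySem.List.pyGetD acc (-1) 0 + x]) [(0 : Int)]
        = List.scanl (fun a b => a + b) 0 samples := by
      have := pv_fold_scanl samples [] 0
      simpa using this
    rw [hpre]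
    rw [PySem.List.foldl_append_singleton_eq_map]
    rw [PySem.List.pyRange_one_append 0 1 (samples.length : Int) (by omega) (by omega),
        PySem.List.pyRange_one_append 1 ((samples.length : Int) - 1) (samples.length : Int)
          (by omega) (by omega)]
    have e1 : PySem.List.pyRange 0 1 1 = [(0 : Int)] := by
      rw [PySem.List.pyRange_one_cons (by norm_num), PySem.List.pyRange_one_eq_nil (by norm_num)]
    have e2 : PySem.List.pyRange ((samples.length : Int) - 1) (samples.length : Int) 1 =
        [(samples.length : Int) - 1] := by
      rw [PySem.List.pyRange_one_cons (by omega), PySem.List.pyRange_one_eq_nil (by omega)]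
    rw [e1, e2]
    simp only [List.map_append, List.map_cons, List.map_nil,
      List.singleton_append, List.nil_append]
    -- first element: prefix window [0,2)
    have hfirst :
        (PySem.List.pyGetD samples 0 0 + PySem.List.pyGetD samples 1 0).tdiv 2 =
        (PySem.List.pyGetD (List.scanl (fun a b => a + b) 0 samples)
            (min (samples.length : Int) ((0:Int) + 2)) 0
          - PySem.List.pyGetD (List.scanl (fun a b => a + b) 0 samples) (max 0 ((0:Int) - 1)) 0).tdiv
          (min (samples.length : Int) ((0:Int) + 2) - max 0 ((0:Int) - 1)) := by
      rw [show min (samples.length : Int) ((0:Int) + 2) = 2 from by omega,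
          show max 0 ((0:Int) - 1) = 0 from by omega]
      rw [pv_P samples 2 (by omega) (by omega), pv_P samples 0 (by omega) (by omega)]
      have := pv_take2 samples 0 (by omega)
      simp only [List.drop_zero] at this
      rw [show ((2:Int)).toNat = 2 from rfl, show ((0:Int)).toNat = 0 from rfl, this]
      rw [@PySem.List.pyGetD_eq_getElem _ samples 0 0 (by omega) (by omega),
          @PySem.List.pyGetD_eq_getElem _ samples 1 0 (by omega) (by omega)]
      simp
    -- last element: prefix window [n-2, n)
    have hlast :
        (PySem.List.pyGetD samples (-2) 0 + PySem.List.pyGetD samples (-1) 0).tdiv 2 =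
        (PySem.List.pyGetD (List.scanl (fun a b => a + b) 0 samples)
            (min (samples.length : Int) (((samples.length : Int) - 1) + 2)) 0
          - PySem.List.pyGetD (List.scanl (fun a b => a + b) 0 samples)
            (max 0 (((samples.length : Int) - 1) - 1)) 0).tdiv
          (min (samples.length : Int) (((samples.length : Int) - 1) + 2)
            - max 0 (((samples.length : Int) - 1) - 1)) := by
      rw [show min (samples.length : Int) (((samples.length : Int) - 1) + 2) = (samples.length : Int)
            from by omega,
          show max 0 (((samples.length : Int) - 1) - 1) = (samples.length : Int) - 2 from by omega]
      rw [pv_P samples (samples.length : Int) (by omega) (by omega),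
          pv_P samples ((samples.length : Int) - 2) (by omega) (by omega)]
      rw [show ((samples.length : Int)).toNat = samples.length from by omega,
          show (((samples.length : Int) - 2)).toNat = samples.length - 2 from by omega]
      rw [pv_window samples (samples.length - 2) samples.length (by omega)]
      rw [show samples.length - (samples.length - 2) = 2 from by omega]
      rw [pv_take2 samples (samples.length - 2) (by omega)]
      rw [PySem.List.pyGetD_neg_ofNat samples 2 0 (by omega) hn,
          PySem.List.pyGetD_neg_ofNat samples 1 0 (by omega) (by omega)]
      simp only [List.take_length, List.sum_cons, List.sum_nil, add_zero]
      simp only [show samples.length - 2 + 1 = samples.length - 1 from by omega]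
      congr 1
      omega
    -- middle elements: prefix window [i-1, i+2)
    have hmid : ∀ i ∈ PySem.List.pyRange 1 ((samples.length : Int) - 1) 1,
        (PySem.List.pyGetD samples (i - 1) 0 + PySem.List.pyGetD samples i 0
          + PySem.List.pyGetD samples (i + 1) 0).tdiv 3 =
        (PySem.List.pyGetD (List.scanl (fun a b => a + b) 0 samples)
            (min (samples.length : Int) (i + 2)) 0
          - PySem.List.pyGetD (List.scanl (fun a b => a + b) 0 samples) (max 0 (i - 1)) 0).tdiv
          (min (samples.length : Int) (i + 2) - max 0 (i - 1)) := by
      intro i hi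
      rw [PySem.List.mem_pyRange_one] at hi
      obtain ⟨h1, h3⟩ := hi
      set k : Nat := (i - 1).toNat with hk
      have hkn : k + 3 ≤ samples.length := by omega
      rw [show min (samples.length : Int) (i + 2) = i + 2 from by omega,
          show max 0 (i - 1) = i - 1 from by omega]
      rw [pv_P samples (i + 2) (by omega) (by omega),
          pv_P samples (i - 1) (by omega) (by omega)]
      rw [show ((i + 2)).toNat = k + 3 from by omega, show ((i - 1)).toNat = k from rfl]
      rw [pv_window samples k (k + 3) (by omega),
          show k + 3 - k = 3 from by omega, pv_take3 samples k hkn]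
      rw [@PySem.List.pyGetD_eq_getElem _ samples (i-1) 0 (by omega) (by omega),
          @PySem.List.pyGetD_eq_getElem _ samples i 0 (by omega) (by omega),
          @PySem.List.pyGetD_eq_getElem _ samples (i+1) 0 (by omega) (by omega)]
      simp only [show (i - 1).toNat = k from hk.symm, show i.toNat = k + 1 from by omega,
        show (i + 1).toNat = k + 2 from by omega]
      simp only [List.sum_cons, List.sum_nil, add_zero]
      rw [show i + 2 - (i - 1) = 3 from by omega]
      congr 1
      ring
    rw [List.map_congr_left hmid, hfirst, hlast]
    simp

-- ===== VERDICT (by name: the statement is the Claim_ definition above) =====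
theorem make_smoothed_samples_spec : Claim_equal_make_smoothed_samples := by
  intro samples _
  unfold Spec_make_smoothed_samples
  exact pv_equiv samples
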